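-- pv_equiv track=rewrite | github.com/KeonhoPark/algorithmStudy | PG_120956.py | solution
-- ===== SOURCE A (Python) =====
-- from itertools import permutations
--
-- def solution(babbling):
--     count = 0
--     p = ["aya", "ye", "woo", "ma"]
--     dictionary = list()
--
--     for i in range(1, 5):
--         for words in permutations(p, i):
--             tmp = ''
--             for word in words:
--                 tmp += word
--             dictionary.append(tmp)
--
--     for b in babbling:
--         if b in dictionary:
--             count += 1
--
--     return count
-- ===== SOURCE B (Python) =====
-- def solution(babbling):
--     words = ["aya", "ye", "woo", "ma"]
--     count = 0
--     for b in babbling: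
--         rest = b
--         used = []
--         ok = bool(b)
--         while ok and rest:
--             for w in words:
--                 if w not in used and rest.startswith(w):
--                     used.append(w)
--                     rest = rest[len(w):]
--                     break
--             else:
--                 ok = False
--         if ok:
--             count += 1
--     return count
-- ===== Notes on version B (the rewrite author's own statement) =====
-- stated objective: alternative
-- what changed: Replaces the precomputed 64-entry permutation dictionary and per-string membership scan with a greedy left-to-right parser that consumes one unused word (aya/ye/woo/ma) at each position; since the words have pairwise distinct first letters, greedy parsing is exact.
import Mathlib
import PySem

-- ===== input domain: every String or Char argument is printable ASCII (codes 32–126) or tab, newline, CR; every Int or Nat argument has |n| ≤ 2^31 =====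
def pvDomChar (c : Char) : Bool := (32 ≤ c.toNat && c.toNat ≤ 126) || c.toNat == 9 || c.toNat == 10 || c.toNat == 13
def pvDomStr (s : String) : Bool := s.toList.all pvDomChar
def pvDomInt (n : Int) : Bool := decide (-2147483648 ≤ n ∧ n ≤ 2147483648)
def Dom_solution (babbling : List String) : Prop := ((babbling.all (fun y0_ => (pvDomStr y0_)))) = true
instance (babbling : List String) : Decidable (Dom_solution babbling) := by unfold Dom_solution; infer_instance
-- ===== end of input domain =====

-- B replaces A's precomputed permutation dictionary by a greedy left-to-right parser
-- over each babbling string (alternative decomposition; exact because the four words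
-- have pairwise distinct first letters).


-- ===== PORT A =====
-- dictionary = all concatenations of permutations(p, i) for i = 1..4 (itertools order)
def solution (babbling : List String) : Int :=
  let p : List String := ["aya", "ye", "woo", "ma"]
  let dictionary : List String :=
    (PySem.List.pyRange 1 5 1).foldl (fun d i =>
      (PySem.List.permutations p i.toNat).foldl (fun d words =>
        d ++ [words.foldl (fun tmp word => tmp ++ word) ""]) d) []
  babbling.foldl (fun count b => if dictionary.contains b then count + 1 else count) 0

-- ===== PORT B =====
-- the four words, as lists of characters (Source B matches them with startswith on the rest)
def wordsB : List (List Char) := [['a','y','a'], ['y','e'], ['w','o','o'], ['m','a']]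

-- the while-loop of Source B: rest = unconsumed suffix, used = words already consumed;
-- fuel = initial length of the string (each iteration consumes at least one char)
def goB : Nat → List Char → List (List Char) → Bool
  | 0, rest, _ => rest.isEmpty
  | f + 1, rest, used =>
    if rest.isEmpty then true
    else
      match wordsB.find? (fun w => w.isPrefixOf rest && !used.contains w) with
      | some w => goB f (rest.drop w.length) (w :: used)
      | none => false

def solution_alt (babbling : List String) : Int :=
  babbling.foldl (fun count b =>
    let cs := b.toList
    if !cs.isEmpty && goB cs.length cs [] then count + 1 else count) 0

-- ===== PRECONDITION & SPEC =====
def Spec_solution (babbling : List String) (out : Int) : Prop := out = solution_alt babbling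
instance (babbling : List String) (out : Int) : Decidable (Spec_solution babbling out) := by unfold Spec_solution; infer_instance

-- ===== CLAIM (what is proved, stated in full; the proofs are below) =====
def Claim_equal_solution : Prop := ∀ (babbling : List String), Dom_solution babbling → Spec_solution babbling (solution babbling)

-- ===== LEMMAS AND PROOFS =====

-- the closed dictionary term of A, named for the proofs
def dictA : List String :=
  (PySem.List.pyRange 1 5 1).foldl (fun d i =>
    (PySem.List.permutations ["aya", "ye", "woo", "ma"] i.toNat).foldl (fun d words =>
      d ++ [words.foldl (fun tmp word => tmp ++ word) ""]) d) []

-- every dictionary entry is nonempty and accepted by the greedy parser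
theorem dictA_parses :
    dictA.all (fun d => !d.toList.isEmpty && goB d.toList.length d.toList []) = true := by
  decide

-- every nonempty injective sequence of words concatenates into the dictionary
theorem flatten_mem_dict :
    (wordsB.sublists.flatMap List.permutations').all
      (fun s => s.isEmpty || (dictA.map String.toList).contains s.flatten) = true := by
  decide

-- soundness of the greedy parser: success means the input splits into distinct unused words
theorem goB_sound : ∀ (f : Nat) (rest : List Char) (used : List (List Char)),
    goB f rest used = true →
    ∃ seq : List (List Char), rest = seq.flatten ∧ seq.Nodup ∧
      ∀ w ∈ seq, w ∈ wordsB ∧ w ∉ used := by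
  intro f
  induction f with
  | zero =>
    intro rest used h
    simp only [goB, List.isEmpty_iff] at h
    exact ⟨[], by simp [h]⟩
  | succ f ih =>
    intro rest used h
    by_cases hre : rest.isEmpty
    · exact ⟨[], by simp_all [List.isEmpty_iff]⟩
    · simp only [goB, hre, if_false, Bool.false_eq_true] at h
      cases hf : wordsB.find? (fun w => w.isPrefixOf rest && !used.contains w) with
      | none => rw [hf] at h; exact absurd h (by simp)
      | some w =>
        rw [hf] at h
        have hw := List.find?_some hf
        have hmem := List.mem_of_find?_eq_some hf
        simp only [Bool.and_eq_true, Bool.not_eq_eq_eq_not, Bool.not_true] at hw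
        obtain ⟨hpre, hnu⟩ := hw
        have hpre' : w <+: rest := by
          rw [← List.isPrefixOf_iff_prefix]; exact hpre
        obtain ⟨t, ht⟩ := hpre'
        obtain ⟨seq, h1, h2, h3⟩ := ih _ _ h
        have hdrop : rest.drop w.length = t := by rw [← ht]; exact List.drop_left
        refine ⟨w :: seq, ?_, ?_, ?_⟩
        · rw [← ht, List.flatten_cons, ← h1, hdrop]
        · refine List.nodup_cons.2 ⟨fun hc => ?_, h2⟩
          exact (h3 w hc).2 (List.mem_cons_self ..)
        · intro w' hw'
          rcases List.mem_cons.1 hw' with h' | h'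
          · subst h'
            exact ⟨hmem, by intro hc; rw [List.contains_iff_mem.2 hc] at hnu; cases hnu⟩
          · obtain ⟨ha, hb⟩ := h3 w' h'
            exact ⟨ha, fun hc => hb (List.mem_cons_of_mem _ hc)⟩

-- the per-string predicates agree
theorem pred_eq (b : String) :
    dictA.contains b = (!b.toList.isEmpty && goB b.toList.length b.toList []) := by
  rw [Bool.eq_iff_iff]
  constructor
  · intro h
    have hb : b ∈ dictA := List.contains_iff_mem.1 h
    exact List.all_eq_true.1 dictA_parses b hb
  · intro h
    rw [Bool.and_eq_true] at h
    obtain ⟨hne, hgo⟩ := h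
    have hne' : b.toList ≠ [] := by simpa [List.isEmpty_iff] using hne
    obtain ⟨seq, h1, h2, h3⟩ := goB_sound _ _ _ hgo
    have hseqne : seq ≠ [] := by rintro rfl; exact hne' (by simpa using h1)
    have hsub : seq ⊆ wordsB := fun w hw => (h3 w hw).1
    obtain ⟨t, hperm, hsl⟩ := h2.subperm hsub
    have hmem : seq ∈ wordsB.sublists.flatMap List.permutations' :=
      List.mem_flatMap.2 ⟨t, List.mem_sublists.2 hsl, List.mem_permutations'.2 hperm.symm⟩
    have := List.all_eq_true.1 flatten_mem_dict seq hmem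
    rw [Bool.or_eq_true] at this
    rcases this with h' | h'
    · exact absurd (List.isEmpty_iff.1 h') hseqne
    · have : seq.flatten ∈ dictA.map String.toList := List.contains_iff_mem.1 h'
      obtain ⟨d, hd, hdl⟩ := List.mem_map.1 this
      have : d = b := String.toList_inj.mp (by rw [hdl, ← h1])
      exact List.contains_iff_mem.2 (this ▸ hd)

theorem fold_eq (l : List String) (c : Int) :
    l.foldl (fun count b => if dictA.contains b then count + 1 else count) c =
    l.foldl (fun count b =>
      if !b.toList.isEmpty && goB b.toList.length b.toList [] then count + 1 else count) c := by
  induction l generalizing c with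
  | nil => rfl
  | cons b t ih => simp only [List.foldl_cons, pred_eq b]; exact ih _

-- ===== VERDICT (by name: the statement is the Claim_ definition above) =====
theorem solution_spec : Claim_equal_solution := by
  intro babbling _
  show solution babbling = solution_alt babbling
  exact fold_eq babbling 0
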